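-- pv_equiv track=rewrite | github.com/LowriWilliams/Comparing-Hierarchical-Approaches-to-Enhance-Supervised-Emotive-Text-Classification | cosine_similarity.py | create_feature_vectors
-- ===== SOURCE A (Python) =====
-- from itertools import groupby, combinations
--
-- def create_feature_vectors(generalised_emotions, unique_indicies):
--     seperated_indicies = []
--
--     for i in generalised_emotions:
--         for j in i[2:]:
--             tmp = [i[0], i[1], j]
--             seperated_indicies.append(tmp)
--
--     feature_vectors = []
--
--     for k, g in groupby(seperated_indicies, lambda x: x[:2]):
--         values = [x[2] for x in g]
--         tmp = (k + [", ".join("1" if x in values else "0" for x in unique_indicies)])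
--         feature_vectors.append(tmp)
--
--     return feature_vectors
-- ===== SOURCE B (Python) =====
-- def create_feature_vectors(generalised_emotions, unique_indicies):
--     # Filter out non-contributing rows once, then emit one result per maximal run
--     # of equal (row[0], row[1]) keys by recursive run-splitting (span + recurse on
--     # the remainder), aggregating each run's tail values into a set.
--     rows = [r for r in generalised_emotions if len(r) > 2]
--     return _emit_runs(rows, unique_indicies)
--
-- def _emit_runs(rows, unique_indicies):
--     if not rows:
--         return []
--     key = rows[0][:2]
--     n = 1
--     while n < len(rows) and rows[n][:2] == key:
--         n += 1
--     vals = {v for r in rows[:n] for v in r[2:]}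
--     head = key + [", ".join("1" if u in vals else "0" for u in unique_indicies)]
--     return [head] + _emit_runs(rows[n:], unique_indicies)
-- ===== Notes on version B (the rewrite author's own statement) =====
-- stated objective: faster
-- what changed: Instead of flattening rows into (key,value) triples and folding itertools.groupby's output with a per-index list scan, B filters out non-contributing rows once and recursively splits the remaining list into maximal equal-key runs (span + recurse on the tail), aggregating each run's values into a set so the per-unique-index membership test is O(1) instead of a scan of the run's values.
import Mathlib
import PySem

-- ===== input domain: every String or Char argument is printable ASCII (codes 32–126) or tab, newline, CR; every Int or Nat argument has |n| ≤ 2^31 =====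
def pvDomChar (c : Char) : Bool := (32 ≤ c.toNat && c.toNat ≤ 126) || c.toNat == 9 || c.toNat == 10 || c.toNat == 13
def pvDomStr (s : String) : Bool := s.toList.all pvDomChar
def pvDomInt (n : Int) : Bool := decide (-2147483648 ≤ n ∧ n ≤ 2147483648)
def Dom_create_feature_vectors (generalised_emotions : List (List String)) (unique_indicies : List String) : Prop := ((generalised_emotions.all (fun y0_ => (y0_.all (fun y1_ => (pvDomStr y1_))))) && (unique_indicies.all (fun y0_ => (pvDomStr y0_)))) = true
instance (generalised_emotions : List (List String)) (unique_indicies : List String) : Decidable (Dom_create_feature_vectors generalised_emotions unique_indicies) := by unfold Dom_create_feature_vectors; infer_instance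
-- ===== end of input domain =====

-- B filters out non-contributing rows once and recursively splits the remainder into maximal
-- equal-key runs (span + recurse), aggregating each run's values into a set for O(1) membership tests (objective: faster; measured).

-- ===== PORT A =====
-- port of itertools.groupby specialised to materialised (key, group-list) pairs:
-- consecutive elements with equal key form one group.
def pyGroupBy {α β : Type} [BEq β] (key : α → β) : List α → List (β × List α)
  | [] => []
  | x :: xs =>
    match pyGroupBy key xs with
    | [] => [(key x, [x])]
    | (k, g) :: rest => if key x == k then (key x, x :: g) :: rest else (key x, [x]) :: (k, g) :: rest

-- transliteration of A; i[2:] on a list = drop 2 (nonnegative index, exact);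
-- i[0]/i[1] are in range whenever the inner loop body runs (i[2:] nonempty), so pyGetD is exact there.
def create_feature_vectors (generalised_emotions : List (List String)) (unique_indicies : List String) : List (List String) :=
  let seperated_indicies := generalised_emotions.foldl (fun acc i =>
    (i.drop 2).foldl (fun acc2 j =>
      acc2 ++ [[PySem.List.pyGetD i 0 "", PySem.List.pyGetD i 1 "", j]]) acc) []
  (pyGroupBy (fun x => x.take 2) seperated_indicies).foldl (fun acc kg =>
    let values := kg.2.map (fun x => PySem.List.pyGetD x 2 "")
    acc ++ [kg.1 ++ [PySem.Str.join ", " (unique_indicies.map (fun x => if values.contains x then "1" else "0"))]]) []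

-- ===== PORT B =====
-- the inner while loop of _emit_runs: splits rows into the maximal leading run whose
-- rows[:2] equals key (= rows[:n]) and the remainder (= rows[n:])
def runOf (key : List String) : List (List String) → List (List String) × List (List String)
  | [] => ([], [])
  | r :: rs =>
    if r.take 2 == key then
      let p := runOf key rs
      (r :: p.1, p.2)
    else ([], r :: rs)

lemma runOf_snd_len (key : List String) : ∀ rs : List (List String), (runOf key rs).2.length ≤ rs.length := by
  intro rs
  induction rs with
  | nil => simp [runOf]
  | cons r rs ih =>
    by_cases hc : (r.take 2 == key) = true
    · simp only [runOf, hc, if_true]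
      exact Nat.le_succ_of_le ih
    · simp [runOf, hc]

-- the set comprehension {v for r in rows[:n] for v in r[2:]} rendered as a membership row
def pvJoinSet (unique_indicies : List String) (vals : PySem.Set String) : String :=
  PySem.Str.join ", " (unique_indicies.map (fun u => if PySem.Set.contains vals u then "1" else "0"))

def emit_runs (rows : List (List String)) (unique_indicies : List String) : List (List String) :=
  match rows with
  | [] => []
  | r :: rs =>
    let key := r.take 2
    let p := runOf key rs
    let vals := PySem.Set.ofList ((r :: p.1).flatMap (fun x => x.drop 2))
    (key ++ [pvJoinSet unique_indicies vals]) :: emit_runs p.2 unique_indicies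
termination_by rows.length
decreasing_by
  simp only [List.length_cons]
  exact Nat.lt_succ_of_le (runOf_snd_len _ rs)

def create_feature_vectors_alt (generalised_emotions : List (List String)) (unique_indicies : List String) : List (List String) :=
  emit_runs (generalised_emotions.filter (fun r => decide (2 < r.length))) unique_indicies

-- ===== PRECONDITION & SPEC =====
def Spec_create_feature_vectors (generalised_emotions : List (List String)) (unique_indicies : List String) (out : List (List String)) : Prop := out = create_feature_vectors_alt generalised_emotions unique_indicies
instance (generalised_emotions : List (List String)) (unique_indicies : List String) (out : List (List String)) : Decidable (Spec_create_feature_vectors generalised_emotions unique_indicies out) := by unfold Spec_create_feature_vectors; infer_instance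

-- ===== CLAIM (what is proved, stated in full; the proofs are below) =====
def Claim_equal_create_feature_vectors : Prop := ∀ (generalised_emotions : List (List String)) (unique_indicies : List String), Dom_create_feature_vectors generalised_emotions unique_indicies → Spec_create_feature_vectors generalised_emotions unique_indicies (create_feature_vectors generalised_emotions unique_indicies)

-- ===== LEMMAS AND PROOFS =====

def mkRowB (unique_indicies : List String) (vals : List String) : String :=
  PySem.Str.join ", " (unique_indicies.map (fun u => if vals.contains u then "1" else "0"))

-- the rows that contribute, as (key, tail) pairs
def pairsOf (ge : List (List String)) : List (List String × List String) :=
  ge.filterMap (fun row => if row.drop 2 = [] then none else some (row.take 2, row.drop 2))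

-- merge consecutive equal-key pairs
def mergeRuns : List (List String × List String) → List (List String × List String)
  | [] => []
  | (k, v) :: ps =>
    match mergeRuns ps with
    | [] => [(k, v)]
    | (k', v') :: more => if k == k' then (k, v ++ v') :: more else (k, v) :: (k', v') :: more

lemma mergeRuns_head (k : List String) (v : List String) (ps : List (List String × List String)) :
    ∃ w rest, mergeRuns ((k, v) :: ps) = (k, w) :: rest := by
  unfold mergeRuns
  rcases h : mergeRuns ps with _ | ⟨⟨k', v'⟩, more⟩
  · exact ⟨v, [], rfl⟩
  · by_cases hk : k == k'
    · simp [hk]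
    · simp [hk]

lemma mergeRuns_merge (k : List String) (vs tail : List String) (ps : List (List String × List String)) :
    mergeRuns ((k, vs) :: (k, tail) :: ps) = mergeRuns ((k, vs ++ tail) :: ps) := by
  show (match mergeRuns ((k, tail) :: ps) with
    | [] => [(k, vs)]
    | (k', v') :: more => if k == k' then (k, vs ++ v') :: more else (k, vs) :: (k', v') :: more) = _
  unfold mergeRuns
  rcases h : mergeRuns ps with _ | ⟨⟨k', v'⟩, more⟩
  · simp
  · by_cases hk : k == k' <;> simp [hk, List.append_assoc]

lemma mergeRuns_ne (k key : List String) (vs tail : List String) (ps : List (List String × List String))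
    (hne : k ≠ key) :
    mergeRuns ((k, vs) :: (key, tail) :: ps) = (k, vs) :: mergeRuns ((key, tail) :: ps) := by
  obtain ⟨w, rest, hw⟩ := mergeRuns_head key tail ps
  show (match mergeRuns ((key, tail) :: ps) with
    | [] => [(k, vs)]
    | (k', v') :: more => if k == k' then (k, vs ++ v') :: more else (k, vs) :: (k', v') :: more) = _
  rw [hw]
  simp [hne]

lemma mergeRuns_cons_eq (k v : List String) (ps : List (List String × List String)) :
    mergeRuns ((k, v) :: ps)
      = match mergeRuns ps with
        | [] => [(k, v)]
        | (k', v') :: more => if k == k' then (k, v ++ v') :: more else (k, v) :: (k', v') :: more := by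
  rw [mergeRuns]

lemma pyGroupBy_cons (x : List String) (xs : List (List String)) :
    pyGroupBy (fun y => y.take 2) (x :: xs)
      = match pyGroupBy (fun y => y.take 2) xs with
        | [] => [(x.take 2, [x])]
        | (k, g) :: rest => if x.take 2 == k then (x.take 2, x :: g) :: rest
            else (x.take 2, [x]) :: (k, g) :: rest := by
  rw [pyGroupBy]
  rcases pyGroupBy (fun y => List.take 2 y) xs with _ | ⟨⟨k, g⟩, rest⟩ <;> rfl

lemma pairsOf_cons_skip (row : List String) (rest : List (List String)) (ht : row.drop 2 = []) :
    pairsOf (row :: rest) = pairsOf rest := by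
  have h2 : row.length ≤ 2 := by simpa using ht
  simp [pairsOf, h2]

lemma pairsOf_cons (row : List String) (rest : List (List String)) (ht : ¬ row.drop 2 = []) :
    pairsOf (row :: rest) = (row.take 2, row.drop 2) :: pairsOf rest := by
  simp only [pairsOf, List.filterMap_cons, if_neg ht]

-- A-side: the seperated_indicies list is the flatMap of the contributing pairs
def embedP (kv : List String × List String) : List (List String) :=
  kv.2.map (fun j => kv.1 ++ [j])

lemma sep_eq (ge : List (List String)) :
    ∀ acc, ge.foldl (fun acc i =>
      (i.drop 2).foldl (fun acc2 j =>
        acc2 ++ [[PySem.List.pyGetD i 0 "", PySem.List.pyGetD i 1 "", j]]) acc) acc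
      = acc ++ (pairsOf ge).flatMap embedP := by
  induction ge with
  | nil => intro acc; simp [pairsOf]
  | cons row rest ih =>
    intro acc
    simp only [List.foldl_cons]
    rw [PySem.List.foldl_append_singleton_eq_map, ih]
    by_cases ht : row.drop 2 = []
    · have h2 : row.length ≤ 2 := by simpa using ht
      simp [ht, pairsOf_cons_skip row rest ht]
    · have hp := pairsOf_cons row rest ht
      rcases row with _ | ⟨a, row'⟩
      · simp at ht
      rcases row' with _ | ⟨b, row''⟩
      · simp at ht
      have hmap : (row''.drop 0).map
          (fun j => [PySem.List.pyGetD (a :: b :: row'') 0 "", PySem.List.pyGetD (a :: b :: row'') 1 "", j])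
          = ((a :: b :: row'').drop 2).map (fun j => (a :: b :: row'').take 2 ++ [j]) := by
        apply List.map_congr_left
        intro j _
        have h0 : (0:Int) ≤ (row''.length:Int) + 1 := by positivity
        simp [PySem.List.pyGetD, PySem.List.pyGet?, PySem.List.pyIdx?, h0]
      simp only [List.drop_succ_cons, List.drop_zero] at *
      rw [show (row''.map fun j => [PySem.List.pyGetD (a :: b :: row'') 0 "", PySem.List.pyGetD (a :: b :: row'') 1 "", j]) = row''.map fun j => (a :: b :: row'').take 2 ++ [j] by
        simpa using hmap]
      simp [hp, embedP, List.append_assoc]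

lemma take2_embed (k : List String) (hk : k.length = 2) (j : String) :
    (k ++ [j]).take 2 = k := by
  rw [List.take_append_of_le_length (by omega)]
  exact List.take_of_length_le (by omega)

-- a block of equal-key elements prepended to pyGroupBy's input merges into its head group
def headMerge (k : List String) (block : List (List String))
    (gs : List (List String × List (List String))) : List (List String × List (List String)) :=
  match gs with
  | [] => [(k, block)]
  | (k', g) :: more => if k == k' then (k, block ++ g) :: more else (k, block) :: (k', g) :: more

lemma pyGroupBy_block (k : List String) (hk : k.length = 2) :
    ∀ (vs : List String), vs ≠ [] → ∀ rest,
      pyGroupBy (fun x => x.take 2) (vs.map (fun j => k ++ [j]) ++ rest)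
        = headMerge k (vs.map (fun j => k ++ [j])) (pyGroupBy (fun x => x.take 2) rest) := by
  intro vs
  induction vs with
  | nil => intro h; exact absurd rfl h
  | cons j vs ih =>
    intro _ rest
    rcases Decidable.em (vs = []) with hvs | hvs
    · subst hvs
      simp only [List.map_cons, List.map_nil, List.singleton_append]
      rw [pyGroupBy_cons]
      rcases hg : pyGroupBy (fun x => x.take 2) rest with _ | ⟨⟨k', g⟩, more⟩
      · simp [hg, headMerge, take2_embed k hk j]
      · by_cases hkk : k == k' <;>
          simp [hg, headMerge, take2_embed k hk j, hkk]
    · simp only [List.map_cons, List.cons_append]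
      rw [pyGroupBy_cons, ih hvs rest]
      rcases hg : pyGroupBy (fun x => x.take 2) rest with _ | ⟨⟨k', g⟩, more⟩
      · simp [hg, headMerge, take2_embed k hk j]
      · by_cases hkk : k = k'
        · subst hkk
          simp [hg, headMerge, take2_embed k hk j]
        · simp [hg, headMerge, take2_embed k hk j, hkk]

def FmapG (kv : List String × List String) : List String × List (List String) :=
  (kv.1, kv.2.map (fun j => kv.1 ++ [j]))

lemma pyGroupBy_flat :
    ∀ (ps : List (List String × List String)),
      (∀ kv ∈ ps, kv.1.length = 2 ∧ kv.2 ≠ []) →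
      pyGroupBy (fun x => x.take 2) (ps.flatMap embedP) = (mergeRuns ps).map FmapG := by
  intro ps
  induction ps with
  | nil => intro _; simp [mergeRuns, pyGroupBy]
  | cons kv ps ih =>
    intro hinv
    obtain ⟨hk2, hvne⟩ := hinv kv (List.mem_cons_self ..)
    have hinv' : ∀ kv ∈ ps, kv.1.length = 2 ∧ kv.2 ≠ [] :=
      fun x hx => hinv x (List.mem_cons_of_mem _ hx)
    rcases kv with ⟨k, vs⟩
    simp only [List.flatMap_cons]
    rw [show embedP (k, vs) = vs.map (fun j => k ++ [j]) from rfl]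
    rw [pyGroupBy_block k hk2 vs hvne, ih hinv']
    show headMerge k (vs.map (fun j => k ++ [j])) ((mergeRuns ps).map FmapG)
      = (mergeRuns ((k, vs) :: ps)).map FmapG
    rw [mergeRuns_cons_eq]
    rcases h : mergeRuns ps with _ | ⟨⟨k', v'⟩, more⟩
    · simp [headMerge, FmapG]
    · by_cases hkk : k == k'
      · have hke : k = k' := by simpa using hkk
        simp [headMerge, FmapG, ← hke]
      · simp [headMerge, FmapG, hkk]

lemma mergeRuns_keylen (ps : List (List String × List String))
    (h : ∀ kv ∈ ps, kv.1.length = 2) :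
    ∀ kv ∈ mergeRuns ps, kv.1.length = 2 := by
  induction ps with
  | nil => simp [mergeRuns]
  | cons kv ps ih =>
    rcases kv with ⟨k, v⟩
    have hk := h (k, v) (List.mem_cons_self ..)
    have h' : ∀ kv ∈ ps, kv.1.length = 2 := fun x hx => h x (List.mem_cons_of_mem _ hx)
    have ih' := ih h'
    rw [mergeRuns_cons_eq]
    rcases hm : mergeRuns ps with _ | ⟨⟨k', v'⟩, more⟩
    · simpa using hk
    · rw [hm] at ih'
      by_cases hkk : (k == k') = true
      · simp only [hkk, if_true]
        intro x hx
        rcases List.mem_cons.mp hx with hx | hx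
        · simp [hx, hk]
        · exact ih' x (List.mem_cons_of_mem _ hx)
      · simp only [hkk, Bool.false_eq_true, if_false]
        intro x hx
        rcases List.mem_cons.mp hx with hx | hx
        · simp [hx, hk]
        · exact ih' x hx

lemma pairsOf_inv (ge : List (List String)) :
    ∀ kv ∈ pairsOf ge, kv.1.length = 2 ∧ kv.2 ≠ [] := by
  intro kv hkv
  simp only [pairsOf, List.mem_filterMap] at hkv
  obtain ⟨row, _, hrow⟩ := hkv
  by_cases ht : row.drop 2 = []
  · simp [ht] at hrow
  · simp only [ht, if_false, Option.some.injEq] at hrow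
    have hlen : 3 ≤ row.length := by
      have := List.length_drop (l := row) (i := 2)
      rcases Nat.lt_or_ge row.length 3 with h | h
      · exfalso; apply ht; apply List.eq_nil_of_length_eq_zero; omega
      · omega
    constructor
    · rw [← hrow]; simp [List.length_take]; omega
    · rw [← hrow]; exact ht

lemma pyGetD_embed (k : List String) (hk : k.length = 2) (j : String) :
    PySem.List.pyGetD (k ++ [j]) 2 "" = j := by
  rcases k with _ | ⟨a, k'⟩
  · simp at hk
  rcases k' with _ | ⟨b, k''⟩
  · simp at hk
  have : k'' = [] := by simpa using hk
  subst this
  simp [PySem.List.pyGetD, PySem.List.pyGet?, PySem.List.pyIdx?]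

-- A equals the merged-runs rendering (membership tested on the raw value list)
lemma A_eq (ge : List (List String)) (u : List String) :
    create_feature_vectors ge u
      = (mergeRuns (pairsOf ge)).map (fun kv => kv.1 ++ [mkRowB u kv.2]) := by
  unfold create_feature_vectors
  rw [sep_eq ge []]
  simp only [List.nil_append]
  rw [pyGroupBy_flat (pairsOf ge) (pairsOf_inv ge)]
  rw [PySem.List.foldl_append_singleton_eq_map]
  simp only [List.nil_append, List.map_map]
  apply List.map_congr_left
  intro kv hkv
  have hk2 : kv.1.length = 2 :=
    mergeRuns_keylen (pairsOf ge) (fun x hx => (pairsOf_inv ge x hx).1) kv hkv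
  have hcongr : ((fun x => PySem.List.pyGetD x 2 "") ∘ fun j => kv.1 ++ [j]) = id := by
    funext j; simp [pyGetD_embed kv.1 hk2 j]
  simp only [Function.comp_apply, FmapG, List.map_map]
  simp [hcongr, mkRowB]

-- ===== B-side lemmas =====

def pairFn (r : List String) : List String × List String := (r.take 2, r.drop 2)

-- head of qs (if any) has a key different from k
def headNe (k : List String) : List (List String × List String) → Prop
  | [] => True
  | q :: _ => ¬ (q.1 = k)

lemma mergeRuns_run_aux (k : List String) :
    ∀ (ps : List (List String × List String)) (v : List String), (∀ p ∈ ps, p.1 = k) →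
    ∀ qs, headNe k qs →
      mergeRuns ((k, v) :: ps ++ qs) = (k, v ++ ps.flatMap Prod.snd) :: mergeRuns qs := by
  intro ps
  induction ps with
  | nil =>
    intro v _ qs hq
    simp only [List.flatMap_nil, List.append_nil]
    rcases qs with _ | ⟨⟨kq, vq⟩, qs'⟩
    · simp [mergeRuns]
    · have hne : k ≠ kq := fun h => hq (h ▸ rfl)
      exact mergeRuns_ne k kq v vq qs' hne
  | cons p ps ih =>
    intro v hall qs hq
    rcases p with ⟨k1, v1⟩
    have hk1 : k1 = k := hall (k1, v1) (List.mem_cons_self ..)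
    subst hk1
    have hall' : ∀ p ∈ ps, p.1 = k1 := fun x hx => hall x (List.mem_cons_of_mem _ hx)
    have step : mergeRuns ((k1, v) :: (k1, v1) :: (ps ++ qs)) = mergeRuns ((k1, v ++ v1) :: (ps ++ qs)) :=
      mergeRuns_merge k1 v v1 (ps ++ qs)
    calc mergeRuns ((k1, v) :: ((k1, v1) :: ps) ++ qs)
        = mergeRuns ((k1, v ++ v1) :: ps ++ qs) := by simpa using step
      _ = (k1, (v ++ v1) ++ ps.flatMap Prod.snd) :: mergeRuns qs := ih (v ++ v1) hall' qs hq
      _ = (k1, v ++ ((k1, v1) :: ps).flatMap Prod.snd) :: mergeRuns qs := by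
            simp [List.append_assoc]

lemma runOf_split (key : List String) : ∀ rs : List (List String), rs = (runOf key rs).1 ++ (runOf key rs).2 := by
  intro rs
  induction rs with
  | nil => simp [runOf]
  | cons r rs ih =>
    by_cases h : (r.take 2 == key) = true
    · simp only [runOf, h, if_true]
      exact congrArg (r :: ·) ih
    · simp [runOf, h]

lemma runOf_keys (key : List String) : ∀ rs : List (List String), ∀ r ∈ (runOf key rs).1, r.take 2 = key := by
  intro rs
  induction rs with
  | nil => simp [runOf]
  | cons r rs ih =>
    by_cases h : (r.take 2 == key) = true
    · simp only [runOf, h, if_true]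
      intro x hx
      rcases List.mem_cons.mp hx with hx | hx
      · subst hx; simpa using h
      · exact ih x hx
    · simp [runOf, h]

lemma runOf_rest (key : List String) : ∀ rs : List (List String), headNe key ((runOf key rs).2.map pairFn) := by
  intro rs
  induction rs with
  | nil => simp [runOf, headNe]
  | cons r rs ih =>
    by_cases h : (r.take 2 == key) = true
    · simpa only [runOf, h, if_true] using ih
    · simp only [runOf, h, Bool.false_eq_true, if_false, List.map_cons]
      exact fun hek => h (by simp [pairFn] at hek; simp [hek])

lemma flatMap_pairFn_snd (rows : List (List String)) :
    (rows.map pairFn).flatMap Prod.snd = rows.flatMap (fun x => x.drop 2) := by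
  induction rows with
  | nil => rfl
  | cons r rs ih => simp [pairFn, ih]

-- B's recursion equals the merged-runs rendering (membership tested on the set)
lemma emit_eq_aux (u : List String) :
    ∀ (n : Nat) (rows : List (List String)), rows.length ≤ n →
      emit_runs rows u
        = (mergeRuns (rows.map pairFn)).map
            (fun kv => kv.1 ++ [pvJoinSet u (PySem.Set.ofList kv.2)]) := by
  intro n
  induction n with
  | zero =>
    intro rows hlen
    have : rows = [] := List.eq_nil_of_length_eq_zero (Nat.le_zero.mp hlen)
    subst this
    simp [emit_runs, mergeRuns]
  | succ n ih =>
    intro rows hlen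
    rcases rows with _ | ⟨r, rs⟩
    · simp [emit_runs, mergeRuns]
    · rw [emit_runs]
      have hsplit := runOf_split (r.take 2) rs
      have hps : ∀ p ∈ (pairFn r) :: ((runOf (r.take 2) rs).1.map pairFn), p.1 = r.take 2 := by
        intro p hp
        rcases List.mem_cons.mp hp with hp | hp
        · simp [hp, pairFn]
        · obtain ⟨x, hx, hxp⟩ := List.mem_map.mp hp
          rw [← hxp]
          exact runOf_keys (r.take 2) rs x hx
      have hmr : mergeRuns ((r :: rs).map pairFn)
          = (r.take 2, (r :: (runOf (r.take 2) rs).1).flatMap (fun x => x.drop 2))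
              :: mergeRuns (((runOf (r.take 2) rs).2).map pairFn) := by
        conv_lhs => rw [List.map_cons, hsplit, List.map_append]
        have := mergeRuns_run_aux (r.take 2)
          ((runOf (r.take 2) rs).1.map pairFn) (r.drop 2)
          (fun p hp => hps p (List.mem_cons_of_mem _ hp))
          (((runOf (r.take 2) rs).2).map pairFn)
          (runOf_rest (r.take 2) rs)
        have h2 : pairFn r = (r.take 2, r.drop 2) := rfl
        rw [h2]
        rw [List.cons_append] at this
        rw [this, flatMap_pairFn_snd]
        simp
      rw [hmr]
      simp only [List.map_cons]
      congr 1
      exact ih _ (Nat.le_trans (runOf_snd_len _ rs) (Nat.le_of_succ_le_succ hlen))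

lemma emit_eq (u : List String) (rows : List (List String)) :
    emit_runs rows u
      = (mergeRuns (rows.map pairFn)).map
          (fun kv => kv.1 ++ [pvJoinSet u (PySem.Set.ofList kv.2)]) :=
  emit_eq_aux u rows.length rows (Nat.le_refl _)

lemma pairsOf_eq_filter (ge : List (List String)) :
    pairsOf ge = (ge.filter (fun r => decide (2 < r.length))).map pairFn := by
  induction ge with
  | nil => simp [pairsOf]
  | cons row rest ih =>
    by_cases ht : row.drop 2 = []
    · have h2 : row.length ≤ 2 := by simpa using ht
      rw [pairsOf_cons_skip row rest ht, ih]
      simp [Nat.not_lt.mpr h2]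
    · have h2 : 2 < row.length := by
        rcases Nat.lt_or_ge 2 row.length with h | h
        · exact h
        · exact absurd (by simpa using h : row.drop 2 = []) ht
      rw [pairsOf_cons row rest ht]
      simp [h2, pairFn, ih]

-- ===== VERDICT (by name: the statement is the Claim_ definition above) =====
theorem create_feature_vectors_spec : Claim_equal_create_feature_vectors := by
  intro ge u _
  show create_feature_vectors ge u = create_feature_vectors_alt ge u
  rw [A_eq, create_feature_vectors_alt, emit_eq, ← pairsOf_eq_filter]
  apply List.map_congr_left
  intro kv _
  simp [pvJoinSet, mkRowB, PySem.Set.contains]
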